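-- pv_equiv track=rewrite | github.com/ShaliniAnandaPhD/Synthetix | Neuron/Microservices/healthcare/healthcare_integration.py | _count_languages
-- ===== SOURCE A (Python) =====
-- def _count_languages(records):
--     """Count records by language."""
--     language_counts = {}
--
--     for record in records:
--         lang = record.get("detected_language", "unknown")
--         if lang not in language_counts:
--             language_counts[lang] = 0
--         language_counts[lang] += 1
--
--     return language_counts
-- ===== SOURCE B (Python) =====
-- def _count_languages(records):
--     """Count records by language via repeated partitioning: take the first
--     remaining language, split the list into matches and non-matches, record
--     the match count, and continue on the remainder."""
--     langs = [r.get("detected_language", "unknown") for r in records]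
--     result = {}
--     while langs:
--         lang = langs[0]
--         matches = [x for x in langs if x == lang]
--         langs = [x for x in langs if x != lang]
--         result[lang] = len(matches)
--     return result
-- ===== Notes on version B (the rewrite author's own statement) =====
-- stated objective: alternative
-- what changed: Replaces the single-pass hash-counter accumulation with a partition-based grouping: repeatedly take the first remaining language, split the worklist into matches and non-matches, record the matches' length, and recurse on the remainder (no counter is ever incremented and no per-key lookup happens).
import Mathlib
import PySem

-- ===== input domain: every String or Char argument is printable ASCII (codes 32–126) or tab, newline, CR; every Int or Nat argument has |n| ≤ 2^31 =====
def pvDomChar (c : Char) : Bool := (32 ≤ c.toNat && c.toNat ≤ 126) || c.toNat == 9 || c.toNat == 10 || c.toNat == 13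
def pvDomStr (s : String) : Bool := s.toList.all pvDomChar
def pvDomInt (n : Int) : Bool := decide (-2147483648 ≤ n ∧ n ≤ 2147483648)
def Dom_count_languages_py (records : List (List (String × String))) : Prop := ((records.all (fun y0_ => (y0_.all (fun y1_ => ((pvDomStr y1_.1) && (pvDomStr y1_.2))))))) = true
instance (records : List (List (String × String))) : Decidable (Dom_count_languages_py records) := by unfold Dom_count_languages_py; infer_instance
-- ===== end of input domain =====

-- B replaces A's single-pass hash-counter accumulation by partition-based grouping: repeatedly take the first remaining language, split the worklist into matched and non-matched, record the matched' length (alternative decomposition, same result).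


-- ===== PORT A =====
-- A: one pass, a dict accumulator: initialise a key to 0 on first sight, then += 1.
def count_languages_py (records : List (List (String × String))) : List (String × Int) :=
  let language_counts := records.foldl (fun language_counts record =>
    let lang := (PySem.Dict.ofList record).getD "detected_language" "unknown"
    let language_counts :=
      if language_counts.contains lang = false then language_counts.insert lang 0
      else language_counts
    language_counts.insert lang (language_counts.getD lang 0 + 1)) PySem.Dict.empty
  language_counts.items

-- ===== PORT B =====
-- B's while loop: each round takes the first remaining language, partitions the
-- worklist into matched and non-matched, stores the match count under a key never
-- seen before (every copy of it was just removed), so result[lang] = n appends the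
-- pair (lang, n) to the insertion-ordered dict, here the association list `result`.
def count_languages_loop : List String → List (String × Int) → List (String × Int)
  | [], result => result
  | lang :: rest, result =>
    let matched := (lang :: rest).filter (fun x => x == lang)
    let langs' := (lang :: rest).filter (fun x => !(x == lang))
    count_languages_loop langs' (result ++ [(lang, (matched.length : Int))])
termination_by l _ => l.length
decreasing_by
  simp only [List.filter, beq_self_eq_true, Bool.not_true, List.length_cons]
  exact Nat.lt_succ_of_le (List.length_filter_le _ _)

def count_languages_py_alt (records : List (List (String × String))) : List (String × Int) :=
  let langs := records.map (fun r => (PySem.Dict.ofList r).getD "detected_language" "unknown")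
  count_languages_loop langs []

-- ===== PRECONDITION & SPEC =====
def Spec_count_languages_py (records : List (List (String × String))) (out : List (String × Int)) : Prop := out = count_languages_py_alt records
instance (records : List (List (String × String))) (out : List (String × Int)) : Decidable (Spec_count_languages_py records out) := by unfold Spec_count_languages_py; infer_instance

-- ===== CLAIM (what is proved, stated in full; the proofs are below) =====
def Claim_equal_count_languages_py : Prop := ∀ (records : List (List (String × String))), Dom_count_languages_py records → Spec_count_languages_py records (count_languages_py records)

-- ===== LEMMAS AND PROOFS =====

-- A's update "if absent insert 0; then insert getD+1" collapses to one counting insert.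
theorem stepA_eq (d : PySem.Dict String Int) (x : String) :
    (if d.contains x = false then d.insert x 0 else d).insert x
      ((if d.contains x = false then d.insert x 0 else d).getD x 0 + 1)
      = d.insert x (d.getD x 0 + 1) := by
  cases h : d.contains x
  · simp only [if_true]
    rw [PySem.Dict.insert_insert_self, PySem.Dict.getD_insert_self,
      PySem.Dict.getD_of_not_contains d 0 h]
  · simp only [Bool.true_eq_false, if_false]

-- Folding Set.add over a list that never mentions the head leaves the head in front.
theorem foldl_add_cons (a : String) (s l : List String) (h : a ∉ l) :
    List.foldl PySem.Set.add (a :: s) l = a :: List.foldl PySem.Set.add s l := by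
  induction l generalizing s with
  | nil => rfl
  | cons y ys ih =>
    have hya : y ≠ a := fun e => h (e ▸ List.mem_cons_self)
    have : PySem.Set.add (a :: s) y = a :: PySem.Set.add s y := by
      rw [PySem.Set.add_eq_ite, PySem.Set.add_eq_ite]
      by_cases hy : y ∈ s
      · simp [hy]
      · have : y ∉ a :: s := by simp [hya, hy]
        simp [hy, this]
    simp only [List.foldl_cons, this]
    exact ih _ (fun hm => h (List.mem_cons_of_mem _ hm))

-- Elements already in the accumulator may be filtered out of the tail of an add-fold.
theorem foldl_add_filter (x : String) (l : List String) :
    ∀ s : List String, x ∈ s →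
      List.foldl PySem.Set.add s l
        = List.foldl PySem.Set.add s (l.filter (fun y => !(y == x))) := by
  induction l with
  | nil => intro s _; rfl
  | cons y ys ih =>
    intro s hx
    by_cases hy : y = x
    · subst hy
      have : PySem.Set.add s y = s := by rw [PySem.Set.add_eq_ite, if_pos hx]
      simp [List.filter, this, ih s hx]
    · have hmem : x ∈ PySem.Set.add s y := (PySem.Set.mem_add s y x).mpr (Or.inl hx)
      have hb : (!(y == x)) = true := by simp [hy]
      simp only [List.filter, hb, List.foldl_cons]
      exact ih _ hmem

-- Python set(x::xs) starts with x, followed by the distinct non-x elements.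
theorem ofList_cons (x : String) (xs : List String) :
    PySem.Set.ofList (x :: xs)
      = x :: PySem.Set.ofList (xs.filter (fun y => !(y == x))) := by
  have h0 : PySem.Set.add ([] : List String) x = [x] := by
    rw [PySem.Set.add_eq_ite, if_neg (List.not_mem_nil)]; rfl
  have hnx : x ∉ xs.filter (fun y => !(y == x)) := by
    intro hm
    have := (List.mem_filter.mp hm).2
    simp at this
  rw [PySem.Set.ofList_eq_foldl, PySem.Set.ofList_eq_foldl, List.foldl_cons, h0,
    foldl_add_filter x xs [x] (List.mem_singleton.mpr rfl),
    foldl_add_cons x [] _ hnx]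

-- The partition loop computes each distinct language with its total count.
theorem count_languages_loop_eq_aux (n : Nat) : ∀ (l : List String), l.length ≤ n →
    ∀ acc : List (String × Int),
    count_languages_loop l acc
      = acc ++ (PySem.Set.ofList l).map (fun k => (k, (l.count k : Int))) := by
  induction n with
  | zero =>
    intro l hl acc
    have : l = [] := List.eq_nil_of_length_eq_zero (Nat.le_zero.mp hl)
    subst this
    simp [count_languages_loop, PySem.Set.ofList_eq_foldl]
  | succ n ih =>
    intro l hl acc
    match l with
    | [] => simp [count_languages_loop, PySem.Set.ofList_eq_foldl]
    | x :: xs =>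
      rw [count_languages_loop]
      have hfl : (x :: xs).filter (fun y => !(y == x)) = xs.filter (fun y => !(y == x)) := by
        simp [List.filter]
      have hlen : (xs.filter (fun y => !(y == x))).length ≤ n :=
        Nat.le_of_lt_succ (Nat.lt_of_le_of_lt (List.length_filter_le _ _)
          (Nat.lt_of_succ_le hl))
      rw [hfl, ih _ hlen, ofList_cons, List.map_cons, List.append_assoc]
      have hhead : ((x :: xs).filter (fun y => y == x)).length = (x :: xs).count x := by
        simp [List.count_eq_length_filter]
      rw [hhead, List.singleton_append]
      congr 1
      congr 1
      · apply List.map_congr_left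
        intro k hk
        have hkx : k ≠ x := by
          have := (List.mem_filter.mp ((PySem.Set.mem_ofList _ k).mp hk)).2
          simpa using this
        have h1 : (x :: xs).count k = xs.count k := by
          simp [Ne.symm hkx]
        have h2 : (xs.filter (fun y => !(y == x))).count k = xs.count k :=
          List.count_filter (by simpa using hkx)
        rw [h1, ← h2]

theorem count_languages_loop_eq (l : List String) (acc : List (String × Int)) :
    count_languages_loop l acc
      = acc ++ (PySem.Set.ofList l).map (fun k => (k, (l.count k : Int))) :=
  count_languages_loop_eq_aux l.length l (Nat.le_refl _) acc

-- ===== VERDICT (by name: the statement is the Claim_ definition above) =====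
theorem count_languages_py_spec : Claim_equal_count_languages_py := by
  intro records _
  unfold Spec_count_languages_py count_languages_py count_languages_py_alt
  dsimp only
  rw [PySem.List.foldl_congr_mem _ _
        (fun d record => PySem.Dict.insert d
            ((PySem.Dict.ofList record).getD "detected_language" "unknown")
            (d.getD ((PySem.Dict.ofList record).getD "detected_language" "unknown") 0 + 1))
        _ (fun d r _ => stepA_eq d _),
      ← List.foldl_map
        (f := fun r : List (String × String) => (PySem.Dict.ofList r).getD "detected_language" "unknown")
        (g := fun (d : PySem.Dict String Int) x => d.insert x (d.getD x 0 + 1)),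
      PySem.Dict.foldl_insert_getD_add_one_eq_counter, PySem.Dict.items_counter,
      count_languages_loop_eq, List.nil_append]
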